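-- pv_equiv track=rewrite | github.com/rafamdr/coding_chanllenges | largestRect/main.py | get_largest_range
-- ===== SOURCE A (Python) =====
-- def get_largest_range(line):
--     curr_idx = -1
--     curr_sum = max_sum = 0
--     curr_row_count = row_count = 0
--     i = col_count = 0
--     for i, value in enumerate(line):
--         if curr_idx == -1:
--             if value > 0:
--                 curr_idx = i
--                 curr_sum += value
--                 curr_row_count = value
--         else:
--             if value > 0:
--                 curr_sum += value
--                 curr_row_count = min(curr_row_count, value)
--             else:
--                 if curr_sum > max_sum:
--                     max_sum = curr_sum
--                     col_count = i - curr_idx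
--                     row_count = curr_row_count
--                 curr_idx = -1
--                 curr_sum = 0
--
--     if curr_idx != -1:
--         if curr_sum > max_sum:
--             col_count = i - curr_idx + 1
--             row_count = curr_row_count
--
--     return row_count, col_count
-- ===== SOURCE B (Python) =====
-- def get_largest_range(line):
--     # Partition into maximal runs of strictly-positive values, then pick the
--     # first run with strictly greatest sum; return (min of that run, its length).
--     runs = []
--     i, n = 0, len(line)
--     while i < n:
--         if line[i] > 0:
--             j = i
--             while j < n and line[j] > 0:
--                 j += 1
--             runs.append(line[i:j])
--             i = j
--         else:
--             i += 1
--     best_sum, best = 0, (0, 0)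
--     for r in runs:
--         s = sum(r)
--         if s > best_sum:
--             best_sum, best = s, (min(r), len(r))
--     return best
-- ===== Notes on version B (the rewrite author's own statement) =====
-- stated objective: alternative
-- what changed: B first partitions the line into maximal runs of strictly-positive values and then selects the first run of strictly greatest sum, instead of A's single pass with index/accumulator bookkeeping and a duplicated end-of-list closure branch.
import Mathlib
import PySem

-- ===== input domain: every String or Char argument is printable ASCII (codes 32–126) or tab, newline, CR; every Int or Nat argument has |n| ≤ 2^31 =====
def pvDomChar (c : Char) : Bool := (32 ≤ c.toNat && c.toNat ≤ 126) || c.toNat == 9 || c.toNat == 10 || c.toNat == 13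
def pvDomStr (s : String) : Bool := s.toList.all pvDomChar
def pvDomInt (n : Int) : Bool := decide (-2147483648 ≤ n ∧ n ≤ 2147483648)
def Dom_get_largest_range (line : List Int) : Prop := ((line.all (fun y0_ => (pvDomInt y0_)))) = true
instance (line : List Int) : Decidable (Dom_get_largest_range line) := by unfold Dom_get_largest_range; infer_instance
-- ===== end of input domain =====

-- B partitions the line into maximal strictly-positive runs and picks the first run of greatest sum,
-- replacing A's single pass with index/accumulator bookkeeping; same return value, proved equal below.


-- ===== PORT A =====
-- loop state: (curr_idx, curr_sum, max_sum, curr_row_count, row_count, i, col_count)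
def pvStepA (s : Int × Int × Int × Int × Int × Int × Int) (p : Int × Int) :
    Int × Int × Int × Int × Int × Int × Int :=
  let (ci, cs, ms, crc, rc, _i, cc) := s
  let iv := p.1
  let v := p.2
  if ci == -1 then
    if v > 0 then (iv, cs + v, ms, v, rc, iv, cc)
    else (ci, cs, ms, crc, rc, iv, cc)
  else
    if v > 0 then (ci, cs + v, ms, min crc v, rc, iv, cc)
    else if cs > ms then (-1, 0, cs, crc, crc, iv, iv - ci)
    else (-1, 0, ms, crc, rc, iv, cc)

-- the `if curr_idx != -1: if curr_sum > max_sum: …` tail and the return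
def pvFinishA (s : Int × Int × Int × Int × Int × Int × Int) : Int × Int :=
  let (ci, cs, ms, crc, rc, i, cc) := s
  if ci != -1 then
    if cs > ms then (crc, i - ci + 1) else (rc, cc)
  else (rc, cc)

def get_largest_range (line : List Int) : Int × Int :=
  pvFinishA ((PySem.List.enumerate line 0).foldl pvStepA (-1, 0, 0, 0, 0, 0, 0))

-- ===== PORT B =====
-- the scanning while-loop of Source B: the list of maximal strictly-positive runs
def pvPosRuns : List Int → List (List Int)
  | [] => []
  | x :: xs =>
    if x > 0 then (x :: xs.takeWhile (fun y => 0 < y)) :: pvPosRuns (xs.dropWhile (fun y => 0 < y))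
    else pvPosRuns xs
termination_by l => l.length
decreasing_by
  · simpa using Nat.lt_succ_of_le (List.length_dropWhile_le (fun y => 0 < y) xs)
  · simp

-- min(r) on a nonempty run
def pvRunMin : List Int → Int
  | [] => 0
  | x :: xs => xs.foldl min x

-- the selection for-loop of Source B
def pvBestRun (acc : Int × (Int × Int)) (r : List Int) : Int × (Int × Int) :=
  let s := r.sum
  if s > acc.1 then (s, (pvRunMin r, (r.length : Int))) else acc

def get_largest_range_alt (line : List Int) : Int × Int :=
  ((pvPosRuns line).foldl pvBestRun (0, (0, 0))).2

-- ===== PRECONDITION & SPEC =====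
def Spec_get_largest_range (line : List Int) (out : Int × Int) : Prop := out = get_largest_range_alt line
instance (line : List Int) (out : Int × Int) : Decidable (Spec_get_largest_range line out) := by unfold Spec_get_largest_range; infer_instance

-- ===== CLAIM (what is proved, stated in full; the proofs are below) =====
def Claim_equal_get_largest_range : Prop := ∀ (line : List Int), Dom_get_largest_range line → Spec_get_largest_range line (get_largest_range line)

-- ===== LEMMAS AND PROOFS =====

-- Combined invariant, by induction on a length bound N:
--  (fresh)  from a fresh state (curr_idx = -1) at index n with committed (M,R,C), A's loop+tail
--           computes B's selection fold over the runs of the remaining list seeded with (M,(R,C));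
--  (active) from an active state (curr_idx = j ≥ 0, partial sum s, partial min m) at index n with
--           i = n-1, A computes B's fold over the runs after the current run, seeded by comparing
--           the completed run's sum s + Σ(takeWhile) against M.
theorem pvCombined : ∀ (N : Nat) (l : List Int), l.length ≤ N →
    (∀ (n i0 crc M R C : Int), 0 ≤ n →
      pvFinishA ((PySem.List.enumerate l n).foldl pvStepA (-1, 0, M, crc, R, i0, C)) =
        ((pvPosRuns l).foldl pvBestRun (M, (R, C))).2)
    ∧
    (∀ (n j s M m R C : Int), 0 ≤ j → 0 ≤ n →
      pvFinishA ((PySem.List.enumerate l n).foldl pvStepA (j, s, M, m, R, n - 1, C)) =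
        ((pvPosRuns (l.dropWhile (fun y => 0 < y))).foldl pvBestRun
          (if s + (l.takeWhile (fun y => 0 < y)).sum > M then
             (s + (l.takeWhile (fun y => 0 < y)).sum,
              ((l.takeWhile (fun y => 0 < y)).foldl min m,
               n + ((l.takeWhile (fun y => 0 < y)).length : Int) - j))
           else (M, (R, C)))).2) := by
  intro N
  induction N with
  | zero =>
    intro l hl
    have hnil : l = [] := List.eq_nil_of_length_eq_zero (Nat.le_zero.mp hl)
    subst hnil
    constructor
    · intro n i0 crc M R C _
      simp [PySem.List.enumerate, pvFinishA, pvPosRuns]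
    · intro n j s M m R C hj hn
      have hne : (j != -1) = true := by simp; omega
      simp only [PySem.List.enumerate_nil, List.foldl_nil, List.takeWhile_nil,
        List.dropWhile_nil, pvPosRuns, pvFinishA, List.sum_nil, List.length_nil, hne, if_true]
      split_ifs with h1 h2 h2 <;> simp_all <;> omega
  | succ N ih =>
    intro l hl
    cases l with
    | nil =>
      constructor
      · intro n i0 crc M R C _
        simp [PySem.List.enumerate, pvFinishA, pvPosRuns]
      · intro n j s M m R C hj hn
        have hne : (j != -1) = true := by simp; omega
        simp only [PySem.List.enumerate_nil, List.foldl_nil, List.takeWhile_nil,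
          List.dropWhile_nil, pvPosRuns, pvFinishA, List.sum_nil, List.length_nil, hne, if_true]
        split_ifs with h1 h2 h2 <;> simp_all <;> omega
    | cons x xs =>
      have hxs : xs.length ≤ N := by simpa using Nat.lt_succ_iff.mp (Nat.lt_of_lt_of_le (by simp) hl)
      constructor
      · -- fresh case
        intro n i0 crc M R C hn
        rw [PySem.List.enumerate_cons]
        by_cases hx : x > 0
        · -- run starts at index n
          have hstep : pvStepA (-1, 0, M, crc, R, i0, C) (n, x) = (n, 0 + x, M, x, R, n, C) := by
            simp [pvStepA, hx]
          rw [List.foldl_cons, hstep]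
          have hrun := (ih xs hxs).2 (n + 1) n (0 + x) M x R C hn (by omega)
          have hi : n + 1 - 1 = n := by ring
          rw [hi] at hrun
          rw [hrun]
          have hruns : pvPosRuns (x :: xs) =
              (x :: xs.takeWhile (fun y => 0 < y)) :: pvPosRuns (xs.dropWhile (fun y => 0 < y)) := by
            rw [pvPosRuns]; simp [hx]
          rw [hruns, List.foldl_cons]
          have hsum : (x :: xs.takeWhile (fun y => 0 < y)).sum =
              0 + x + (xs.takeWhile (fun y => 0 < y)).sum := by simp
          have hbest : pvBestRun (M, (R, C)) (x :: xs.takeWhile (fun y => 0 < y)) =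
              (if 0 + x + (xs.takeWhile (fun y => 0 < y)).sum > M then
                 (0 + x + (xs.takeWhile (fun y => 0 < y)).sum,
                  ((xs.takeWhile (fun y => 0 < y)).foldl min x,
                   n + 1 + ((xs.takeWhile (fun y => 0 < y)).length : Int) - n))
               else (M, (R, C))) := by
            simp only [pvBestRun, pvRunMin, hsum]
            split_ifs with h
            · simp; omega
            · simp
          rw [hbest]
        · -- x ≤ 0 : stay fresh
          have hstep : pvStepA (-1, 0, M, crc, R, i0, C) (n, x) = (-1, 0, M, crc, R, n, C) := by
            simp [pvStepA, hx]
          rw [List.foldl_cons, hstep]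
          have hruns : pvPosRuns (x :: xs) = pvPosRuns xs := by
            rw [pvPosRuns]; simp [hx]
          rw [hruns]
          exact (ih xs hxs).1 (n + 1) n crc M R C (by omega)
      · -- active case
        intro n j s M m R C hj hn
        rw [PySem.List.enumerate_cons]
        have hjne : (j == -1) = false := by simp; omega
        by_cases hx : x > 0
        · -- run continues
          have hstep : pvStepA (j, s, M, m, R, n - 1, C) (n, x) = (j, s + x, M, min m x, R, n, C) := by
            simp [pvStepA, hjne, hx]
          rw [List.foldl_cons, hstep]
          have hrun := (ih xs hxs).2 (n + 1) j (s + x) M (min m x) R C hj (by omega)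
          have hi : n + 1 - 1 = n := by ring
          rw [hi] at hrun
          rw [hrun]
          have htw : (x :: xs).takeWhile (fun y => 0 < y) = x :: xs.takeWhile (fun y => 0 < y) := by
            simp [hx]
          have hdw : (x :: xs).dropWhile (fun y => 0 < y) = xs.dropWhile (fun y => 0 < y) := by
            simp [hx]
          rw [htw, hdw]
          have e1 : s + x + (xs.takeWhile (fun y => 0 < y)).sum =
              s + (x :: xs.takeWhile (fun y => 0 < y)).sum := by simp; ring
          have e3 : (n + 1 : Int) + ((xs.takeWhile (fun y => 0 < y)).length : Int) - j =
              n + ((x :: xs.takeWhile (fun y => 0 < y)).length : Int) - j := by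
            simp; push_cast; ring
          rw [e1, e3, List.foldl_cons]
        · -- run ends at index n
          have htw : (x :: xs).takeWhile (fun y => 0 < y) = [] := by
            simp [hx]
          have hdw : (x :: xs).dropWhile (fun y => 0 < y) = x :: xs := by
            simp [List.dropWhile_cons]; omega
          rw [htw, hdw]
          have hruns : pvPosRuns (x :: xs) = pvPosRuns xs := by
            rw [pvPosRuns]; simp [hx]
          rw [hruns]
          by_cases hgt : s > M
          · have hstep : pvStepA (j, s, M, m, R, n - 1, C) (n, x) = (-1, 0, s, m, m, n, n - j) := by
              simp [pvStepA, hjne, hx, hgt]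
            rw [List.foldl_cons, hstep]
            have hmain := (ih xs hxs).1 (n + 1) n m s m (n - j) (by omega)
            rw [hmain]
            simp only [List.sum_nil, List.foldl_nil, List.length_nil]
            rw [if_pos (by omega)]
            norm_num
          · have hstep : pvStepA (j, s, M, m, R, n - 1, C) (n, x) = (-1, 0, M, m, R, n, C) := by
              simp [pvStepA, hjne, hx, hgt]
            rw [List.foldl_cons, hstep]
            have hmain := (ih xs hxs).1 (n + 1) n m M R C (by omega)
            rw [hmain]
            simp only [List.sum_nil, List.foldl_nil, List.length_nil]
            rw [if_neg (by omega)]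

-- ===== VERDICT (by name: the statement is the Claim_ definition above) =====
theorem get_largest_range_spec : Claim_equal_get_largest_range := by
  intro line _
  unfold Spec_get_largest_range get_largest_range get_largest_range_alt
  exact (pvCombined line.length line (le_refl _)).1 0 0 0 0 0 0 (le_refl _)
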